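-- pv_equiv track=rewrite | github.com/Santhoshcoder001/aadmf | aadmf/streaming/uci_loader.py | _validate_batch_numbers
-- ===== SOURCE A (Python) =====
-- from typing import Dict, List, Optional, Sequence, Tuple
--
-- def _validate_batch_numbers(batch_numbers: Optional[Sequence[int]]) -> List[int]:
--     if batch_numbers is None:
--         return list(range(1, 11))
--     nums = sorted(set(int(b) for b in batch_numbers))
--     if not nums:
--         raise ValueError("batch_numbers cannot be empty")
--     invalid = [b for b in nums if b < 1 or b > 10]
--     if invalid:
--         raise ValueError(f"Invalid batch numbers {invalid}. Valid range is 1..10")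
--     return nums
-- ===== SOURCE B (Python) =====
-- from typing import List, Optional, Sequence
--
--
-- def _validate_batch_numbers(batch_numbers: Optional[Sequence[int]]) -> List[int]:
--     if batch_numbers is None:
--         return list(range(1, 11))
--     # single pass: bucket array for the fixed domain 1..10, collecting out-of-range values
--     present = [False] * 11
--     invalid = set()
--     for b in batch_numbers:
--         v = int(b)
--         if 1 <= v <= 10:
--             present[v] = True
--         else:
--             invalid.add(v)
--     if not any(present) and not invalid:
--         raise ValueError("batch_numbers cannot be empty")
--     if invalid:
--         raise ValueError(f"Invalid batch numbers {sorted(invalid)}. Valid range is 1..10")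
--     return [i for i in range(1, 11) if present[i]]
-- ===== Notes on version B (the rewrite author's own statement) =====
-- stated objective: alternative
-- what changed: B replaces A's build-a-set-then-comparison-sort pipeline by a single pass that marks a fixed boolean bucket array indexed 1..10 (collecting out-of-range values on the side) and then reads the sorted, deduplicated result straight off the buckets.
import Mathlib
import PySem

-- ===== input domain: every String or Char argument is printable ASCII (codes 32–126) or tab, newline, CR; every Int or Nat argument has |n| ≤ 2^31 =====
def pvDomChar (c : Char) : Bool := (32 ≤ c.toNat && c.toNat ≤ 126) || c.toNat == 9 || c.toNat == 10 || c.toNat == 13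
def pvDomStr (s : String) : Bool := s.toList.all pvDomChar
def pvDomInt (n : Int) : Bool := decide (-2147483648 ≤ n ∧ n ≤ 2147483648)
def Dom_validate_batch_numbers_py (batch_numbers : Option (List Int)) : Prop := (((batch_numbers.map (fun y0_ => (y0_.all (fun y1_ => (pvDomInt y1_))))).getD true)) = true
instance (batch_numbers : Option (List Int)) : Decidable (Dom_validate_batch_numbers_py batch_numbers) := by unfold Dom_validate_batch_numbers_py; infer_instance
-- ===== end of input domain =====

-- B replaces A's sort-the-deduplicated-set pipeline by a single bucket-marking pass over the input and a readout of the fixed 1..10 buckets (same return value; alternative algorithm).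


-- ===== PORT A =====
-- literal port of A; the two 'raise ValueError' branches are excluded by Pre_ below
def validate_batch_numbers_py (batch_numbers : Option (List Int)) : List Int :=
  match batch_numbers with
  | none => PySem.List.pyRange 1 11 1
  | some l =>
    let nums := PySem.List.sorted (PySem.Set.ofList l) (fun x => x) false
    -- if not nums: raise ValueError  (excluded by Pre_)
    let _invalid := nums.filter (fun b => decide (b < 1) || decide (b > 10))
    -- if invalid: raise ValueError  (excluded by Pre_)
    nums

-- ===== PORT B =====
-- one step of B's loop body: mark the bucket (present[v] = True; v.toNat is exact since 1 ≤ v ≤ 10)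
-- or record the out-of-range value in the invalid set
def pvStepB (st : List Bool × PySem.Set Int) (b : Int) : List Bool × PySem.Set Int :=
  if 1 ≤ b ∧ b ≤ 10 then (st.1.set b.toNat true, st.2) else (st.1, st.2.add b)

-- literal port of B; the two 'raise ValueError' branches are excluded by Pre_ below
def validate_batch_numbers_py_alt (batch_numbers : Option (List Int)) : List Int :=
  match batch_numbers with
  | none => PySem.List.pyRange 1 11 1
  | some l =>
    let st := l.foldl pvStepB (List.replicate 11 false, PySem.Set.ofList [])
    -- if not any(present) and not invalid: raise ValueError  (excluded by Pre_)
    -- if invalid: raise ValueError  (excluded by Pre_)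
    -- present[i] for i in 1..10 is an in-range index: getD with i.toNat is exact
    (PySem.List.pyRange 1 11 1).filter (fun i => st.1.getD i.toNat false)

-- ===== PRECONDITION & SPEC =====
-- Pre_ excludes exactly the inputs where A raises ValueError: an empty list, or any element outside 1..10.
def Pre_validate_batch_numbers_py (batch_numbers : Option (List Int)) : Prop :=
  match batch_numbers with
  | none => True
  | some l => l ≠ [] ∧ ∀ b ∈ l, 1 ≤ b ∧ b ≤ 10

instance (batch_numbers : Option (List Int)) : Decidable (Pre_validate_batch_numbers_py batch_numbers) := by
  unfold Pre_validate_batch_numbers_py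
  cases batch_numbers <;> infer_instance

def pvWitness_validate_batch_numbers_py : Option (List Int) := some [3, 1, 3, 10]

def Spec_validate_batch_numbers_py (batch_numbers : Option (List Int)) (out : List Int) : Prop := out = validate_batch_numbers_py_alt batch_numbers
instance (batch_numbers : Option (List Int)) (out : List Int) : Decidable (Spec_validate_batch_numbers_py batch_numbers out) := by unfold Spec_validate_batch_numbers_py; infer_instance

-- ===== CLAIM (what is proved, stated in full; the proofs are below) =====
def Claim_equal_validate_batch_numbers_py : Prop := ∀ (batch_numbers : Option (List Int)), Dom_validate_batch_numbers_py batch_numbers → Pre_validate_batch_numbers_py batch_numbers → Spec_validate_batch_numbers_py batch_numbers (validate_batch_numbers_py batch_numbers)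

-- ===== LEMMAS AND PROOFS =====

theorem pvWitness_ok : Dom_validate_batch_numbers_py pvWitness_validate_batch_numbers_py ∧ Pre_validate_batch_numbers_py pvWitness_validate_batch_numbers_py := by decide

-- bucket j is set after the fold iff j occurs in l or was already set
theorem pvStepB_getD (l : List Int) (st : List Bool × PySem.Set Int)
    (hlen : st.1.length = 11) (hall : ∀ b ∈ l, 1 ≤ b ∧ b ≤ 10)
    (j : Int) (hj : 1 ≤ j ∧ j ≤ 10) :
    ((l.foldl pvStepB st).1.getD j.toNat false = true) ↔
      (j ∈ l ∨ st.1.getD j.toNat false = true) := by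
  induction l generalizing st with
  | nil => simp
  | cons b l ih =>
    have hb := hall b (by simp)
    rw [List.foldl_cons]
    have hstep : pvStepB st b = (st.1.set b.toNat true, st.2) := by
      unfold pvStepB; rw [if_pos hb]
    rw [hstep]
    rw [ih (st.1.set b.toNat true, st.2) (by simpa using hlen)
        (fun x hx => hall x (by simp [hx]))]
    simp only [List.mem_cons]
    by_cases hjb : j = b
    · subst hjb
      have hlt : j.toNat < st.1.length := by omega
      simp [List.getD, List.getElem?_set_self hlt]
    · have hne : b.toNat ≠ j.toNat := by omega
      simp only [List.getD, List.getElem?_set_ne hne]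
      tauto

-- B's result list is a permutation of set(l) when every element of l lies in 1..10
theorem pv_perm (l : List Int) (hb : ∀ b ∈ l, 1 ≤ b ∧ b ≤ 10) :
    ((PySem.List.pyRange 1 11 1).filter
        (fun i => (l.foldl pvStepB (List.replicate 11 false, PySem.Set.ofList [])).1.getD i.toNat false)).Perm
      (PySem.Set.ofList l) := by
  rw [List.perm_ext_iff_of_nodup
        (List.Nodup.filter _ (PySem.List.nodup_pyRange_one 1 11))
        (PySem.Set.nodup_ofList l)]
  intro a
  simp only [List.mem_filter, PySem.List.mem_pyRange_one, PySem.Set.mem_ofList]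
  constructor
  · rintro ⟨hr, hset⟩
    have := (pvStepB_getD l (List.replicate 11 false, PySem.Set.ofList []) (by simp) hb a
        ⟨hr.1, by omega⟩).mp hset
    rcases this with h | h
    · exact h
    · exfalso
      rw [List.getD, List.getElem?_replicate] at h
      split at h <;> simp at h
  · intro ha
    rcases hb a ha with ⟨h1, h2⟩
    exact ⟨⟨h1, by omega⟩,
      (pvStepB_getD l (List.replicate 11 false, PySem.Set.ofList []) (by simp) hb a
        ⟨h1, h2⟩).mpr (Or.inl ha)⟩

theorem pv_pairwise (l : List Int) :
    ((PySem.List.pyRange 1 11 1).filter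
        (fun i => (l.foldl pvStepB (List.replicate 11 false, PySem.Set.ofList [])).1.getD i.toNat false)).Pairwise (· < ·) :=
  List.Pairwise.filter _ (PySem.List.pairwise_lt_pyRange_one 1 11)

-- ===== VERDICT (by name: the statement is the Claim_ definition above) =====
theorem validate_batch_numbers_py_spec : Claim_equal_validate_batch_numbers_py := by
  intro bn _ hpre
  unfold Spec_validate_batch_numbers_py
  cases bn with
  | none => rfl
  | some l =>
    rcases hpre with ⟨_, hb⟩
    simp only [validate_batch_numbers_py, validate_batch_numbers_py_alt]
    exact PySem.List.sorted_eq_of_perm_of_pairwise_lt _ _ _ (pv_perm l hb) (pv_pairwise l)
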